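-- pv_equiv track=rewrite | github.com/diegopenna/IADES_TallerProg1_2025 | NumeroOculto/NumeroOculto.py | compararNumeros
-- ===== SOURCE A (Python) =====
-- def compararNumeros(numeroBase , numero):
--     if numeroBase == numero:
--         return '4B 0R 0M'
--     buenos = 0
--     regulares = 0
--     malos = 0
--     for i in range(len(numero)):
--         encontro = False
--         for j in range(len(numeroBase)):
--             if numero[i] == numeroBase[j]:
--                 encontro = True
--                 if i != j:
--                     regulares += 1 # regulares = reagulares + 1
--                 else:
--                     buenos += 1
--         if encontro == False:
--             malos += 1
--
--     return str(buenos) +"B " + str(regulares) + "R " + str(malos) + "M"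
-- ===== SOURCE B (Python) =====
-- def compararNumeros(numeroBase, numero):
--     if numeroBase == numero:
--         return '4B 0R 0M'
--     freq = {}
--     for ch in numeroBase:
--         freq[ch] = freq.get(ch, 0) + 1
--     buenos = 0
--     regulares = 0
--     malos = 0
--     for i in range(len(numero)):
--         ch = numero[i]
--         cnt = freq.get(ch, 0)
--         good = 1 if i < len(numeroBase) and numeroBase[i] == ch else 0
--         buenos += good
--         regulares += cnt - good
--         malos += 1 if cnt == 0 else 0
--     return str(buenos) + "B " + str(regulares) + "R " + str(malos) + "M"
-- ===== Notes on version B (the rewrite author's own statement) =====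
-- stated objective: faster
-- what changed: Replaces A's nested scan of numeroBase for every character of numero by a character-frequency dict of numeroBase built once, then a single pass over numero using the count and one positional check per character.
import Mathlib
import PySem

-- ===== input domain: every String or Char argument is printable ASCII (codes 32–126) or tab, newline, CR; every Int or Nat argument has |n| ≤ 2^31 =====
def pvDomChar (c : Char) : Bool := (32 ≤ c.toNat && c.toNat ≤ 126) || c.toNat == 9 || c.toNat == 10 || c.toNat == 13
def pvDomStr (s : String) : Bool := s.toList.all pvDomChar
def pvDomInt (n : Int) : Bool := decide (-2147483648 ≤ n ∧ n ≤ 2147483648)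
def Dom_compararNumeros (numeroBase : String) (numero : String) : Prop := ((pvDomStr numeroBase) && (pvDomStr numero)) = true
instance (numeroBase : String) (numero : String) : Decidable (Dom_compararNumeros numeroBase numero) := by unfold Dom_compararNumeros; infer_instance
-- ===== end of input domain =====

-- B replaces A's nested scans of numeroBase by a precomputed char-frequency dict and one pass over numero (objective: faster, O(n*m) → O(n+m)).

-- ===== PORT A =====
-- Literal port of A: for each index i of numero, inner loop over every index j of
-- numeroBase; state (encontro, buenos, regulares) inside, (buenos, regulares, malos) outside.
def compararNumeros (numeroBase : String) (numero : String) : String :=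
  if numeroBase = numero then "4B 0R 0M"
  else
    let nb := numeroBase.toList
    let n := numero.toList
    let res := (List.range n.length).foldl (fun (acc : Int × Int × Int) i =>
        let inner := (List.range nb.length).foldl (fun (st : Bool × Int × Int) j =>
            if n.getD i ' ' = nb.getD j ' ' then
              if i ≠ j then (true, st.2.1, st.2.2 + 1)
              else (true, st.2.1 + 1, st.2.2)
            else st) (false, acc.1, acc.2.1)
        if inner.1 = false then (inner.2.1, inner.2.2, acc.2.2 + 1)
        else (inner.2.1, inner.2.2, acc.2.2)) (0, 0, 0)
    PySem.Int.toStr res.1 ++ "B " ++ PySem.Int.toStr res.2.1 ++ "R " ++ PySem.Int.toStr res.2.2 ++ "M"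

-- ===== PORT B =====
-- Literal port of Source B: build the frequency dict of numeroBase once, then a single pass over numero.
def compararNumeros_alt (numeroBase : String) (numero : String) : String :=
  if numeroBase = numero then "4B 0R 0M"
  else
    let nb := numeroBase.toList
    let n := numero.toList
    let freq := nb.foldl (fun (d : PySem.Dict Char Int) ch => d.insert ch (d.getD ch 0 + 1)) PySem.Dict.empty
    let res := (List.range n.length).foldl (fun (acc : Int × Int × Int) i =>
        let ch := n.getD i ' '
        let cnt := freq.getD ch 0
        let good : Int := if i < nb.length ∧ nb.getD i ' ' = ch then 1 else 0
        (acc.1 + good, acc.2.1 + (cnt - good), acc.2.2 + (if cnt = 0 then 1 else 0))) (0, 0, 0)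
    PySem.Int.toStr res.1 ++ "B " ++ PySem.Int.toStr res.2.1 ++ "R " ++ PySem.Int.toStr res.2.2 ++ "M"

-- ===== PRECONDITION & SPEC =====
def Spec_compararNumeros (numeroBase : String) (numero : String) (out : String) : Prop := out = compararNumeros_alt numeroBase numero
instance (numeroBase : String) (numero : String) (out : String) : Decidable (Spec_compararNumeros numeroBase numero out) := by unfold Spec_compararNumeros; infer_instance

-- ===== CLAIM (what is proved, stated in full; the proofs are below) =====
def Claim_equal_compararNumeros : Prop := ∀ (numeroBase : String) (numero : String), Dom_compararNumeros numeroBase numero → Spec_compararNumeros numeroBase numero (compararNumeros numeroBase numero)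

-- ===== LEMMAS AND PROOFS =====

-- A's inner loop over the first m indices of numeroBase computes: found-flag, buenos
-- increment (positional match within the prefix) and regulares increment (other matches).

lemma inner_eval (nb : List Char) (c : Char) (i : Nat) :
    ∀ (m : Nat), m ≤ nb.length → ∀ (b r : Int),
    (List.range m).foldl (fun (st : Bool × Int × Int) j =>
        if c = nb.getD j ' ' then
          if i ≠ j then (true, st.2.1, st.2.2 + 1)
          else (true, st.2.1 + 1, st.2.2)
        else st) (false, b, r)
    = (decide (c ∈ nb.take m),
       b + (if i < m ∧ nb.getD i ' ' = c then 1 else 0),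
       r + (((nb.take m).count c : Int) - (if i < m ∧ nb.getD i ' ' = c then 1 else 0))) := by
  intro m
  induction m with
  | zero => intro _ b r; simp
  | succ m ih =>
    intro hm b r
    have hmlt : m < nb.length := by omega
    have htake : nb.take (m + 1) = nb.take m ++ [nb[m]] := by
      rw [List.take_add_one]; simp [List.getElem?_eq_getElem hmlt]
    have hgetD : nb.getD m ' ' = nb[m] := List.getD_eq_getElem nb ' ' hmlt
    rw [List.range_succ, List.foldl_append, ih (by omega) b r]
    simp only [List.foldl_cons, List.foldl_nil, htake, List.count_append, List.mem_append,
      hgetD]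
    by_cases hc : c = nb[m]
    · rw [if_pos hc]
      by_cases hij : i = m
      · subst hij
        rw [if_neg (by simp)]
        have hval : nb[i]?.getD ' ' = c := by simp [List.getElem?_eq_getElem hmlt, ← hc]
        have h1 : ¬ (i < i ∧ nb[i]?.getD ' ' = c) := by omega
        have h2 : (i < i + 1 ∧ nb[i]?.getD ' ' = c) := ⟨by omega, hval⟩
        simp [h2, ← hc]
      · rw [if_pos (by omega)]
        have h2 : (i ≤ m ∧ nb[i]?.getD ' ' = c) = (i < m ∧ nb[i]?.getD ' ' = c) := by
          apply propext; constructor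
          · rintro ⟨h, h'⟩; exact ⟨by omega, h'⟩
          · rintro ⟨h, h'⟩; exact ⟨by omega, h'⟩
        simp [h2, ← hc]
        split <;> omega
    · rw [if_neg hc]
      have h2 : (i ≤ m ∧ nb[i]?.getD ' ' = c) = (i < m ∧ nb[i]?.getD ' ' = c) := by
        apply propext; constructor
        · rintro ⟨h, h'⟩
          refine ⟨?_, h'⟩
          rcases Nat.lt_succ_iff_lt_or_eq.mp (by omega : i < m + 1) with h3 | h3
          · exact h3
          · exfalso; apply hc
            rw [← h', h3, List.getElem?_eq_getElem hmlt]
            rfl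
        · rintro ⟨h, h'⟩; exact ⟨by omega, h'⟩
      simp [h2, hc]
      simp [List.count_eq_zero, hc]

-- The frequency dict built by B's first pass looks up to the plain count.
lemma freq_getD (nb : List Char) (c : Char) :
    (nb.foldl (fun (d : PySem.Dict Char Int) ch => d.insert ch (d.getD ch 0 + 1)) PySem.Dict.empty).getD c 0
      = (nb.count c : Int) := by
  rw [PySem.Dict.getD_foldl_insert_add_one]
  simp

-- The two outer loops have extensionally equal step functions, hence equal folds.
lemma fold_eq (nb n : List Char) :
    (List.range n.length).foldl (fun (acc : Int × Int × Int) i =>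
        let inner := (List.range nb.length).foldl (fun (st : Bool × Int × Int) j =>
            if n.getD i ' ' = nb.getD j ' ' then
              if i ≠ j then (true, st.2.1, st.2.2 + 1)
              else (true, st.2.1 + 1, st.2.2)
            else st) (false, acc.1, acc.2.1)
        if inner.1 = false then (inner.2.1, inner.2.2, acc.2.2 + 1)
        else (inner.2.1, inner.2.2, acc.2.2)) (0, 0, 0)
    = (List.range n.length).foldl (fun (acc : Int × Int × Int) i =>
        let ch := n.getD i ' '
        let cnt := (nb.foldl (fun (d : PySem.Dict Char Int) ch => d.insert ch (d.getD ch 0 + 1)) PySem.Dict.empty).getD ch 0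
        let good : Int := if i < nb.length ∧ nb.getD i ' ' = ch then 1 else 0
        (acc.1 + good, acc.2.1 + (cnt - good), acc.2.2 + (if cnt = 0 then 1 else 0))) (0, 0, 0) := by
  congr 1
  funext acc i
  simp only [freq_getD]
  rw [inner_eval nb (n.getD i ' ') i nb.length (le_refl _) acc.1 acc.2.1, List.take_length]
  by_cases hm : n[i]?.getD ' ' ∈ nb
  · have hcnt : ¬ ((nb.count (n[i]?.getD ' ') : Int) = 0) := by
      have := List.count_pos_iff.mpr hm
      omega
    simp [hm]
    omega
  · have hcnt : nb.count (n[i]?.getD ' ') = 0 := List.count_eq_zero.mpr hm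
    have hg : ¬ (i < nb.length ∧ nb[i]?.getD ' ' = n[i]?.getD ' ') := by
      rintro ⟨h, h'⟩
      apply hm
      rw [← h', List.getElem?_eq_getElem h]
      exact List.getElem_mem h
    simp [hm, hcnt, hg]

-- ===== VERDICT (by name: the statement is the Claim_ definition above) =====
theorem compararNumeros_spec : Claim_equal_compararNumeros := by
  intro numeroBase numero _
  unfold Spec_compararNumeros compararNumeros compararNumeros_alt
  by_cases h : numeroBase = numero
  · simp [h]
  · simp only [h, if_false]
    rw [fold_eq numeroBase.toList numero.toList]
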